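-- pv_equiv track=rewrite | github.com/EmmanBanta/final-na-possibly | main.py | generate_unique_collector_id
-- ===== SOURCE A (Python) =====
-- def generate_unique_collector_id(existing_ids):
--     prefix = "02"
--     used_numbers = set()
--
--     for user_id in existing_ids:
--         if user_id.startswith(prefix + "-"):
--             try:
--                 num = int(user_id.split("-")[1])
--                 used_numbers.add(num)
--             except (IndexError, ValueError):
--                 continue
--
--     for i in range(1, 1000):
--         if i not in used_numbers:
--             return f"{prefix}-{i:04}"
--
--     raise Exception("Unable to generate unique collector ID")
-- ===== SOURCE B (Python) =====
-- def generate_unique_collector_id(existing_ids):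
--     prefix = "02"
--     nums = []
--     for user_id in existing_ids:
--         if user_id.startswith(prefix + "-"):
--             try:
--                 nums.append(int(user_id.split("-")[1]))
--             except (IndexError, ValueError):
--                 continue
--     nums.sort()
--     expected = 1
--     for n in nums:
--         if n == expected:
--             expected += 1
--         elif n > expected:
--             break
--     if expected > 999:
--         raise Exception("Unable to generate unique collector ID")
--     return f"{prefix}-{expected:04}"
-- ===== Notes on version B (the rewrite author's own statement) =====
-- stated objective: alternative
-- what changed: Replaces A's membership scan of 1..999 against a set by sorting the parsed numbers once and sweeping the sorted list with a next-expected counter to find the smallest gap.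
import Mathlib
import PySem

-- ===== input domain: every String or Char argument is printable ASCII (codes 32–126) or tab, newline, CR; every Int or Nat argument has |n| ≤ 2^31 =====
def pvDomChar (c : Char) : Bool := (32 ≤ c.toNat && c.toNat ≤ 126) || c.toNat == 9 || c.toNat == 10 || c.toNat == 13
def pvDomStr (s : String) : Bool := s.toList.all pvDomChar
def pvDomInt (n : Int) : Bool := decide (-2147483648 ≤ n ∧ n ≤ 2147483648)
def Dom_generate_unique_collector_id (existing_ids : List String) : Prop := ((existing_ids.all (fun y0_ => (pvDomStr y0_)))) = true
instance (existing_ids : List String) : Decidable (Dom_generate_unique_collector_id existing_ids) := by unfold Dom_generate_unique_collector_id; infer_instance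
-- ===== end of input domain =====

-- B sorts the parsed id numbers once and sweeps the sorted list with a next-expected counter
-- instead of A's membership scan of 1..999 against a set (alternative decomposition, same results).
-- ===== PORT A =====
-- shared parse of one id: 'user_id.startswith("02-")' then 'int(user_id.split("-")[1])' (none = the except branch)
def pvParse? (s : String) : Option Int :=
  if PySem.Str.startswith s "02-" then
    match PySem.List.pyGet? ((PySem.Str.split? s "-").getD []) 1 with
    | none => none
    | some piece => PySem.Int.ofStr? piece
  else none

-- shared f-string f"02-{i:04}"
def pvFmt (i : Int) : String :=
  "02-" ++ PySem.Str.zfill (PySem.Int.toStr i) 4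

def generate_unique_collector_id (existing_ids : List String) : String :=
  let used : PySem.Set Int :=
    existing_ids.foldl (fun used s =>
      match pvParse? s with
      | some n => PySem.Set.add used n
      | none => used) PySem.Set.empty
  match (PySem.List.pyRange 1 1000 1).find? (fun i => !(PySem.Set.contains used i)) with
  | some i => pvFmt i
  | none => ""  -- Python raises Exception here; excluded by Pre_

-- ===== PORT B =====
-- the sorted sweep: skip entries below expected (and duplicates), bump on a hit, stop on a gap
def pvScan : Int → List Int → Int
  | e, [] => e
  | e, n :: rest => if n = e then pvScan (e + 1) rest else if n > e then e else pvScan e rest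

def generate_unique_collector_id_alt (existing_ids : List String) : String :=
  let nums : List Int :=
    existing_ids.foldl (fun acc s =>
      match pvParse? s with
      | some n => acc ++ [n]
      | none => acc) []
  let expected := pvScan 1 (PySem.List.sorted nums (fun x => x) false)
  if expected > 999 then ""  -- Python raises Exception here; excluded by Pre_
  else pvFmt expected

-- ===== PRECONDITION & SPEC =====
-- Pre_ excludes exactly the inputs on which A raises Exception: those whose ids cover every
-- number 1..999 (then B raises the same Exception); on all other inputs both return.
def Pre_generate_unique_collector_id (existing_ids : List String) : Prop :=
  existing_ids.length < 999 ∨ ∃ i ∈ PySem.List.pyRange 1 1000 1, ∀ s ∈ existing_ids, pvParse? s ≠ some i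
instance (existing_ids : List String) : Decidable (Pre_generate_unique_collector_id existing_ids) := by
  unfold Pre_generate_unique_collector_id; infer_instance

def pvWitness_generate_unique_collector_id : List String := ["02-0001", "hello", "02-3"]

def Spec_generate_unique_collector_id (existing_ids : List String) (out : String) : Prop := out = generate_unique_collector_id_alt existing_ids
instance (existing_ids : List String) (out : String) : Decidable (Spec_generate_unique_collector_id existing_ids out) := by unfold Spec_generate_unique_collector_id; infer_instance

-- ===== CLAIM (what is proved, stated in full; the proofs are below) =====
def Claim_equal_generate_unique_collector_id : Prop := ∀ (existing_ids : List String), Dom_generate_unique_collector_id existing_ids → Pre_generate_unique_collector_id existing_ids → Spec_generate_unique_collector_id existing_ids (generate_unique_collector_id existing_ids)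

-- ===== LEMMAS AND PROOFS =====

-- A's fold builds the set of parsed numbers: membership = membership in filterMap pvParse?
theorem memA (ids : List String) (acc : PySem.Set Int) (x : Int) :
    x ∈ ids.foldl (fun used s =>
      match pvParse? s with
      | some n => PySem.Set.add used n
      | none => used) acc ↔ x ∈ acc ∨ x ∈ ids.filterMap pvParse? := by
  induction ids generalizing acc with
  | nil => simp
  | cons s rest ih =>
    simp only [List.foldl_cons, List.filterMap_cons]
    cases h : pvParse? s with
    | none => simp [ih]
    | some n =>
      rw [ih]
      simp only [PySem.Set.mem_add, List.mem_cons]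
      tauto

-- B's fold builds the list of parsed numbers
theorem numsB (ids : List String) (acc : List Int) :
    ids.foldl (fun acc s =>
      match pvParse? s with
      | some n => acc ++ [n]
      | none => acc) acc = acc ++ ids.filterMap pvParse? := by
  induction ids generalizing acc with
  | nil => simp
  | cons s rest ih =>
    simp only [List.foldl_cons, List.filterMap_cons]
    cases h : pvParse? s with
    | none => simp [ih]
    | some n => simp [ih]

-- the sweep over a ≤-sorted list computes the least value ≥ e that is not in the list
theorem pvScan_spec (xs : List Int) (hs : xs.Pairwise (· ≤ ·)) (e : Int) :
    e ≤ pvScan e xs ∧ pvScan e xs ∉ xs ∧ ∀ m, e ≤ m → m < pvScan e xs → m ∈ xs := by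
  induction xs generalizing e with
  | nil =>
    simp only [pvScan]
    exact ⟨le_refl _, by simp, fun m h1 h2 => by omega⟩
  | cons n rest ih =>
    have hrest := ih (List.Pairwise.of_cons hs)
    have hhead : ∀ y ∈ rest, n ≤ y := (List.pairwise_cons.mp hs).1
    rcases lt_trichotomy n e with hlt | heq | hgt
    · have hstep : pvScan e (n :: rest) = pvScan e rest := by
        simp only [pvScan]
        rw [if_neg (by omega), if_neg (by omega)]
      obtain ⟨h3, h4, h5⟩ := hrest e
      rw [hstep]
      refine ⟨h3, ?_, fun m h1 h2 => List.mem_cons_of_mem _ (h5 m h1 h2)⟩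
      simp only [List.mem_cons]
      rintro (h | h)
      · omega
      · exact h4 h
    · subst heq
      have hstep : pvScan n (n :: rest) = pvScan (n + 1) rest := by
        simp [pvScan]
      obtain ⟨h2, h3, h4⟩ := hrest (n + 1)
      rw [hstep]
      refine ⟨by omega, ?_, ?_⟩
      · simp only [List.mem_cons]
        rintro (h | h)
        · omega
        · exact h3 h
      · intro m hm1 hm2
        rcases eq_or_lt_of_le hm1 with h | h
        · simp [← h]
        · exact List.mem_cons_of_mem _ (h4 m (by omega) hm2)
    · have hstep : pvScan e (n :: rest) = e := by
        simp only [pvScan]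
        rw [if_neg (by omega), if_pos (by omega)]
      rw [hstep]
      refine ⟨le_refl _, ?_, fun m h1 h2 => by omega⟩
      simp only [List.mem_cons]
      rintro (h | h)
      · omega
      · exact absurd (hhead e h) (by omega)

-- find? on range(1, 1000) returns the first value satisfying the predicate
theorem find_first (p : Int → Bool) (r : Int) (h1 : 1 ≤ r) (h2 : r ≤ 999)
    (hbelow : ∀ m : Int, 1 ≤ m → m < r → p m = false) (hr : p r = true) :
    (PySem.List.pyRange 1 1000 1).find? p = some r := by
  rw [PySem.List.pyRange_one_append 1 r 1000 (by omega) (by omega), List.find?_append]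
  have hnone : (PySem.List.pyRange 1 r 1).find? p = none := by
    rw [List.find?_eq_none]
    intro x hx
    rw [PySem.List.mem_pyRange_one] at hx
    simp [hbelow x hx.1 hx.2]
  rw [hnone, Option.none_or, PySem.List.pyRange_one_cons (by omega : r < 1000),
      List.find?_cons_of_pos hr]

-- ===== VERDICT (by name: the statement is the Claim_ definition above) =====
theorem generate_unique_collector_id_spec : Claim_equal_generate_unique_collector_id := by
  intro ids _hdom hpre
  unfold Spec_generate_unique_collector_id
  simp only [generate_unique_collector_id, generate_unique_collector_id_alt, numsB,
    List.nil_append]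
  have hperm := PySem.List.sorted_perm (ids.filterMap pvParse?) (fun x => x) false
  have hsorted := PySem.List.sorted_pairwise (ids.filterMap pvParse?) (fun x => x)
  obtain ⟨hge, hnotin, hall⟩ :=
    pvScan_spec (PySem.List.sorted (ids.filterMap pvParse?) (fun x => x) false) hsorted 1
  set r := pvScan 1 (PySem.List.sorted (ids.filterMap pvParse?) (fun x => x) false) with hr
  have hrL : r ∉ ids.filterMap pvParse? := fun h => hnotin (hperm.mem_iff.mpr h)
  have hallL : ∀ m : Int, 1 ≤ m → m < r → m ∈ ids.filterMap pvParse? :=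
    fun m hm1 hm2 => hperm.mem_iff.mp (hall m hm1 hm2)
  have hr999 : r ≤ 999 := by
    by_contra hgt
    rcases hpre with hlen | ⟨i0, hi0mem, hi0free⟩
    · have hsub : PySem.List.pyRange 1 1000 1 ⊆ ids.filterMap pvParse? := by
        intro x hx
        rw [PySem.List.mem_pyRange_one] at hx
        exact hallL x hx.1 (by omega)
      have h9 := ((PySem.List.nodup_pyRange_one (a := 1) (b := 1000)).subperm hsub).length_le
      rw [PySem.List.length_pyRange_one] at h9
      have hfl := List.length_filterMap_le pvParse? ids
      norm_num at h9
      omega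
    · rw [PySem.List.mem_pyRange_one] at hi0mem
      obtain ⟨s, hs, hps⟩ := List.mem_filterMap.mp (hallL i0 (by omega) (by omega))
      exact hi0free s hs hps
  have hmemeq : ∀ x : Int, PySem.Set.contains (ids.foldl (fun used s =>
      match pvParse? s with
      | some n => PySem.Set.add used n
      | none => used) PySem.Set.empty) x = true ↔ x ∈ ids.filterMap pvParse? := by
    intro x
    rw [PySem.Set.contains_iff, memA]
    simp [PySem.Set.empty]
  have hfind := find_first (fun i => !(PySem.Set.contains (ids.foldl (fun used s =>
      match pvParse? s with
      | some n => PySem.Set.add used n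
      | none => used) PySem.Set.empty) i)) r hge hr999
    (by
      intro m hm1 hm2
      simp only [Bool.not_eq_false']
      exact (hmemeq m).mpr (hallL m hm1 hm2))
    (by
      simp only [Bool.not_eq_true']
      exact Bool.eq_false_iff.mpr fun h => hrL ((hmemeq r).mp h))
  rw [hfind, if_neg (by omega : ¬ r > 999)]
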